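-- pv_equiv track=rewrite | github.com/ClaudiaElle/Data-Security-and-Privacy | EserciziSDS/Parte1/Vigenere.py | equals_ngrams_positions
-- ===== SOURCE A (Python) =====
-- def get_repeated_ngrams_frequencies(ciphertext, n):   # Restituisce un dizionario con le frequenze degli n-grammi ripetuti
--     ngrams_frequencies = {}
--     for i in range(len(ciphertext) - n + 1):
--         ngram = ciphertext[i : i+n]   # Seleziona un n-gramma
--         ngrams_frequencies[ngram] = ngrams_frequencies.get(ngram, 0) + 1   # Aggiunge 1 alla frequenza
--     repeated_ngrams_frequencies = {}   # Crea un dizionario vuoto per gli n-grammi filtrati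
--     for trigram, freq in ngrams_frequencies.items():
--         if freq > 1:   # Seleziona solo gli n-grammi ripetuti
--             repeated_ngrams_frequencies[trigram] = freq
--     return repeated_ngrams_frequencies
--
-- def equals_ngrams_positions(ciphertext, n):   # Restituisce un dizionario che associa a ciascun n-gramma ripetuto le posizioni dove compare nel testo
--     ngram_frequencies = get_repeated_ngrams_frequencies(ciphertext, n)
--     ngram_positions = {}   # Dizionario per memorizzare le posizioni degli n-grammi ripetuti
--     for trigram, freq in ngram_frequencies.items():
--         positions = []
--         position = -1   # Inizia la ricerca dalla prima posizione possibile
--         for _ in range(freq):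
--             position = ciphertext.find(trigram, position + 1)
--             positions.append(position)
--         ngram_positions[trigram] = positions
--     return ngram_positions
-- ===== SOURCE B (Python) =====
-- def equals_ngrams_positions(ciphertext, n):
--     # One pass: group every start index by its n-gram, then keep the repeated ones.
--     positions = {}
--     for i in range(len(ciphertext) - n + 1):
--         positions.setdefault(ciphertext[i : i + n], []).append(i)
--     return {ngram: ps for ngram, ps in positions.items() if len(ps) > 1}
-- ===== Notes on version B (the rewrite author's own statement) =====
-- stated objective: faster
-- what changed: B records every n-gram's start index in one grouping pass over the text and filters groups with more than one position, instead of A's two counting passes followed by repeated str.find scans over the whole text for each repeated n-gram.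
-- outside the precondition, e.g. on equals_ngrams_positions('ab', -2): A returns {'': [0, 1, 2, -1, 0]}, B returns {'': [0, 1, 2, 3, 4]}
import Mathlib
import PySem

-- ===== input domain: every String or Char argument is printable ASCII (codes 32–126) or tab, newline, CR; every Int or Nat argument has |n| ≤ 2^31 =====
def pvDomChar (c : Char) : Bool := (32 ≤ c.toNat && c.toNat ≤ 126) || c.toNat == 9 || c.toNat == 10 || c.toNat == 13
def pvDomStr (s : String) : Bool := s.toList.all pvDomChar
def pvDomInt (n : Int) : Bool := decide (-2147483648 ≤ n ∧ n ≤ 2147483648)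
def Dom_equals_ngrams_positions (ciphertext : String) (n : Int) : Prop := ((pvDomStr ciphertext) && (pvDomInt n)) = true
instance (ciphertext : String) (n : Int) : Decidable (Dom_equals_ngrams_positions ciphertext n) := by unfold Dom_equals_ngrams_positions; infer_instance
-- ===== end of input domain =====

-- B builds ngram -> positions in ONE grouping pass and filters groups of size > 1,
-- instead of A's counting pass + per-ngram repeated str.find scans (objective: faster).

-- ===== PORT A =====
-- helper of A: get_repeated_ngrams_frequencies (on the code points of the text)
def get_repeated_ngrams_frequencies (cs : List Char) (n : Int) : PySem.Dict (List Char) Int :=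
  let ngrams_frequencies :=
    (PySem.List.pyRange 0 ((cs.length : Int) - n + 1) 1).foldl
      (fun d i =>
        let ngram := PySem.List.slice cs (some i) (some (i + n))
        d.insert ngram (d.getD ngram 0 + 1))
      PySem.Dict.empty
  ngrams_frequencies.items.foldl
    (fun r p => if p.2 > 1 then r.insert p.1 p.2 else r) PySem.Dict.empty

-- the inner 'for _ in range(freq): position = ciphertext.find(trigram, position+1); positions.append(position)'
def pvFindLoop (cs trigram : List Char) (freq : Int) : Int × List Int :=
  (PySem.List.pyRange 0 freq 1).foldl
    (fun st _ =>
      let position := PySem.Chars.findFrom cs trigram (st.1 + 1) none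
      (position, st.2 ++ [position]))
    (-1, [])

def equals_ngrams_positions (ciphertext : String) (n : Int) : List (String × List Int) :=
  let cs := ciphertext.toList
  let ngram_frequencies := get_repeated_ngrams_frequencies cs n
  let ngram_positions :=
    ngram_frequencies.items.foldl
      (fun d p => d.insert p.1 (pvFindLoop cs p.1 p.2).2) PySem.Dict.empty
  ngram_positions.items.map (fun p => (String.ofList p.1, p.2))

-- ===== PORT B =====
def equals_ngrams_positions_alt (ciphertext : String) (n : Int) : List (String × List Int) :=
  let cs := ciphertext.toList
  let positions :=
    (PySem.List.pyRange 0 ((cs.length : Int) - n + 1) 1).foldl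
      (fun d i => d.modify (PySem.List.slice cs (some i) (some (i + n))) [] (· ++ [i]))
      PySem.Dict.empty
  (positions.items.filter (fun p => p.2.length > 1)).map (fun p => (String.ofList p.1, p.2))

-- ===== PRECONDITION & SPEC =====
-- Pre_ excludes negative n, outside the natural n-gram-length domain: there every "n-gram" is
-- the empty slice and A's find loop restarts from 0 after a -1, an accident of its implementation.
def Pre_equals_ngrams_positions (ciphertext : String) (n : Int) : Prop := 0 ≤ n
instance (ciphertext : String) (n : Int) : Decidable (Pre_equals_ngrams_positions ciphertext n) := by unfold Pre_equals_ngrams_positions; infer_instance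

def pvWitness_equals_ngrams_positions : String × Int := ("abcab", 2)

def Spec_equals_ngrams_positions (ciphertext : String) (n : Int) (out : List (String × List Int)) : Prop := out = equals_ngrams_positions_alt ciphertext n
instance (ciphertext : String) (n : Int) (out : List (String × List Int)) : Decidable (Spec_equals_ngrams_positions ciphertext n out) := by unfold Spec_equals_ngrams_positions; infer_instance

-- ===== CLAIM (what is proved, stated in full; the proofs are below) =====
def Claim_equal_equals_ngrams_positions : Prop := ∀ (ciphertext : String) (n : Int), Dom_equals_ngrams_positions ciphertext n → Pre_equals_ngrams_positions ciphertext n → Spec_equals_ngrams_positions ciphertext n (equals_ngrams_positions ciphertext n)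

-- ===== LEMMAS AND PROOFS =====

def pvR (L n : Int) : List Int := PySem.List.pyRange 0 (L - n + 1) 1
def pvGram (cs : List Char) (n i : Int) : List Char := PySem.List.slice cs (some i) (some (i + n))
def pvOcc (cs : List Char) (n : Int) (g : List Char) : List Int :=
  (pvR (cs.length : Int) n).filter (fun i => pvGram cs n i == g)

theorem pv_mem_occ_iff (cs g : List Char) (n : Int) (hn : 0 ≤ n) (hg : (g.length : Int) = n)
    (i : Nat) (hi : i ≤ cs.length) :
    ((i : Int) ∈ pvOcc cs n g) ↔ g <+: cs.drop i := by
  have hgn : g.length = n.toNat := by omega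
  unfold pvOcc pvR pvGram
  simp only [List.mem_filter, PySem.List.mem_pyRange_one, beq_iff_eq]
  constructor
  · rintro ⟨⟨h0, hlt⟩, hs⟩
    rw [PySem.List.slice_toNat (a := (i:Int)) (b := (i:Int)+n) cs (by positivity) (by omega)] at hs
    have he : ((i : Int) + n).toNat - i = n.toNat := by omega
    simp only [Int.toNat_natCast] at hs
    rw [he] at hs
    rw [← hs]
    exact List.take_prefix _ _
  · intro h
    have hlen : g.length ≤ (cs.drop i).length := h.length_le
    rw [List.length_drop] at hlen
    refine ⟨⟨by positivity, by omega⟩, ?_⟩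
    rw [PySem.List.slice_toNat (a := (i:Int)) (b := (i:Int)+n) cs (by positivity) (by omega)]
    have he : ((i : Int) + n).toNat - i = n.toNat := by omega
    simp only [Int.toNat_natCast]
    rw [he, ← hgn]
    exact (List.prefix_iff_eq_take.mp h).symm

theorem pv_findFrom_eq_next (cs g : List Char) (n : Int) (hn : 0 ≤ n) (hg : (g.length : Int) = n)
    (k : Nat) (hk : k ≤ cs.length) (m : Int)
    (hm : m ∈ pvOcc cs n g) (hkm : (k : Int) ≤ m)
    (hmin : ∀ i ∈ pvOcc cs n g, (k : Int) ≤ i → m ≤ i) :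
    PySem.Chars.findFrom cs g (k : Int) none = m := by
  have hm' := hm
  unfold pvOcc pvR at hm'
  rw [List.mem_filter, PySem.List.mem_pyRange_one] at hm'
  obtain ⟨⟨hm0, hmlt⟩, _⟩ := hm'
  have hmN : (m.toNat : Int) = m := Int.toNat_of_nonneg hm0
  have hmL : m.toNat ≤ cs.length := by omega
  have hpm : g <+: cs.drop m.toNat :=
    (pv_mem_occ_iff cs g n hn hg m.toNat hmL).mp (by rwa [hmN])
  have hkmN : k ≤ m.toNat := by omega
  have h1 : g <+: (cs.drop k).drop (m.toNat - k) := by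
    rw [List.drop_drop]
    have : k + (m.toNat - k) = m.toNat := by omega
    rw [this]; exact hpm
  have hinfix : g <:+: cs.drop k := (List.IsPrefix.isInfix h1).trans (List.IsSuffix.isInfix (List.drop_suffix _ _))
  have hne : PySem.Chars.find (cs.drop k) g ≠ -1 := by
    rw [ne_eq, PySem.Chars.find_eq_neg_one_iff]; exact fun h => h hinfix
  have hnn : 0 ≤ PySem.Chars.find (cs.drop k) g := (PySem.Chars.find_nonneg_iff _ _).mpr hinfix
  obtain ⟨hpre, hmin'⟩ := PySem.Chars.find_spec (s := cs.drop k) (sub := g) hnn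
  have ht_le : (PySem.Chars.find (cs.drop k) g).toNat ≤ m.toNat - k := by
    by_contra h
    push Not at h
    exact hmin' (m.toNat - k) h h1
  have hkt : g <+: cs.drop (k + (PySem.Chars.find (cs.drop k) g).toNat) := by
    rw [← List.drop_drop]; exact hpre
  have hmem : (((k + (PySem.Chars.find (cs.drop k) g).toNat : Nat)) : Int) ∈ pvOcc cs n g := by
    refine (pv_mem_occ_iff cs g n hn hg _ (by omega)).mpr ?_
    exact hkt
  have hge := hmin _ hmem (by push_cast; omega)
  rw [PySem.Chars.findFrom_natCast cs g k hk, if_neg hne]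
  push_cast at hge
  omega

theorem pv_takeLastD (l : List Int) (d : Int) (j : Nat) (h0 : 0 < j) (hj : j ≤ l.length) :
    (l.take j).getLastD d = l[j-1]'(by omega) := by
  rw [List.getLastD_eq_getLast?, List.getLast?_eq_getElem?]
  have h1 : j - 1 < j := Nat.sub_lt h0 one_pos
  simp [List.length_take, Nat.min_eq_left hj, h1]

theorem pv_pairwise_min (l : List Int) (hl : l.Pairwise (· < ·)) (j : Nat) (hj : j < l.length)
    (k : Int) (hlow : ∀ a, (ha : a < j) → l[a]'(by omega) < k) (hk : k ≤ l[j]) :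
    ∀ i ∈ l, k ≤ i → l[j] ≤ i := by
  intro i hi hki
  obtain ⟨a, ha, rfl⟩ := List.mem_iff_getElem.mp hi
  rcases lt_trichotomy a j with h | h | h
  · exact absurd hki (not_le.mpr (hlow a h))
  · subst h; exact le_refl _
  · exact le_of_lt (List.pairwise_iff_getElem.mp hl j a hj ha h)

theorem pv_occ_mem_bounds (cs : List Char) (n : Int) (g : List Char) (i : Int)
    (hi : i ∈ pvOcc cs n g) : 0 ≤ i ∧ i ≤ (cs.length : Int) - n := by
  unfold pvOcc pvR at hi
  rw [List.mem_filter, PySem.List.mem_pyRange_one] at hi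
  omega

theorem pvOcc_pairwise (cs : List Char) (n : Int) (g : List Char) :
    (pvOcc cs n g).Pairwise (· < ·) :=
  (PySem.List.pairwise_lt_pyRange_one 0 _).filter _

theorem pv_findLoop_eq_occ (cs g : List Char) (n : Int) (hn : 0 ≤ n) (hg : (g.length : Int) = n) :
    (pvFindLoop cs g ((pvOcc cs n g).length : Int)).2 = pvOcc cs n g := by
  unfold pvFindLoop
  set occ := pvOcc cs n g with hocc
  have hpw := pvOcc_pairwise cs n g
  rw [← hocc] at hpw
  rw [PySem.List.pyRange_one]
  have hN : (((occ.length : Int)) - 0).toNat = occ.length := by omega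
  rw [hN, List.foldl_map]
  -- main induction
  have main : ∀ j, j ≤ occ.length →
      (List.range j).foldl
        (fun (st : Int × List Int) (_ : Nat) =>
          (PySem.Chars.findFrom cs g (st.1 + 1) none,
           st.2 ++ [PySem.Chars.findFrom cs g (st.1 + 1) none]))
        (-1, []) = ((occ.take j).getLastD (-1), occ.take j) := by
    intro j
    induction j with
    | zero => intro _; simp
    | succ j ih =>
      intro hj1
      have hj : j < occ.length := by omega
      rw [List.range_succ, List.foldl_append, ih (by omega), List.foldl_cons, List.foldl_nil]
      have hstep : PySem.Chars.findFrom cs g ((occ.take j).getLastD (-1) + 1) none = occ[j] := by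
        rcases Nat.eq_zero_or_pos j with h0 | h0
        · subst h0
          have hb := pv_occ_mem_bounds cs n g occ[0] (by rw [hocc] at *; exact List.getElem_mem hj)
          have := pv_findFrom_eq_next cs g n hn hg 0 (by omega) occ[0]
            (by rw [hocc] at *; exact List.getElem_mem hj) (by omega)
            (pv_pairwise_min occ hpw 0 hj 0 (by omega) (by omega))
          simpa using this
        · rw [pv_takeLastD occ (-1) j h0 (by omega)]
          have hlt : occ[j-1]'(by omega) < occ[j] :=
            List.pairwise_iff_getElem.mp hpw (j-1) j (by omega) hj (by omega)
          have hbj := pv_occ_mem_bounds cs n g occ[j] (by rw [hocc] at *; exact List.getElem_mem hj)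
          have hbj1 := pv_occ_mem_bounds cs n g (occ[j-1]'(by omega)) (by rw [hocc] at *; exact List.getElem_mem (by omega : j-1 < occ.length))
          -- k := (occ[j-1] + 1).toNat
          have hkc : (((occ[j-1]'(by omega) + 1).toNat : Int)) = occ[j-1]'(by omega) + 1 := by omega
          have := pv_findFrom_eq_next cs g n hn hg (occ[j-1]'(by omega) + 1).toNat (by omega) occ[j]
            (by rw [hocc] at *; exact List.getElem_mem hj) (by omega)
            ?min
          · rw [hkc] at this; exact this
          case min =>
            rw [hkc]
            exact pv_pairwise_min occ hpw j hj _ (fun a ha => by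
              have : occ[a]'(by omega) ≤ occ[j-1]'(by omega) := by
                rcases Nat.lt_or_ge a (j-1) with h | h
                · exact le_of_lt (List.pairwise_iff_getElem.mp hpw a (j-1) (by omega) (by omega) h)
                · have : a = j - 1 := by omega
                  subst this; exact le_refl _
              omega) (by omega)
      rw [hstep]
      rw [List.take_succ_eq_append_getElem hj]
      refine Prod.ext ?_ rfl
      simp only []
      rw [show occ.take j ++ [occ[j]] = (occ.take (j+1)) from (List.take_succ_eq_append_getElem hj).symm]
      rw [pv_takeLastD occ (-1) (j+1) (by omega) (by omega)]
      simp
  have := main occ.length (le_refl _)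
  rw [this]
  simp

theorem pv_freq_items (cs : List Char) (n : Int) :
    (get_repeated_ngrams_frequencies cs n).items
    = ((PySem.Set.ofList ((pvR (cs.length : Int) n).map (pvGram cs n))).map
         (fun g => (g, (((pvR (cs.length : Int) n).map (pvGram cs n)).count g : Int)))).filter
        (fun p => p.2 > 1) := by
  unfold get_repeated_ngrams_frequencies
  simp only []
  have h1 : (PySem.List.pyRange 0 ((cs.length : Int) - n + 1) 1).foldl
      (fun d i =>
        d.insert (PySem.List.slice cs (some i) (some (i + n)))
          (d.getD (PySem.List.slice cs (some i) (some (i + n))) 0 + 1)) PySem.Dict.empty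
      = PySem.Dict.counter ((pvR (cs.length:Int) n).map (pvGram cs n)) := by
    rw [← PySem.Dict.foldl_insert_getD_add_one_eq_counter, List.foldl_map]
    rfl
  rw [h1, PySem.Dict.items_counter]
  have h2 : ∀ (l : List (List Char × Int)) (d : PySem.Dict (List Char) Int),
      l.foldl (fun r p => if p.2 > 1 then r.insert p.1 p.2 else r) d
      = (l.filter (fun p => decide (p.2 > 1))).foldl (fun r p => r.insert p.1 p.2) d := by
    intro l
    induction l with
    | nil => intro d; rfl
    | cons hd tl ih =>
      intro d
      by_cases h : hd.2 > 1
      · simp [h, ih]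
      · simp [h, ih]
  rw [h2]
  set l := ((PySem.Set.ofList ((pvR (cs.length : Int) n).map (pvGram cs n))).map
         (fun g => (g, (((pvR (cs.length : Int) n).map (pvGram cs n)).count g : Int)))).filter
        (fun p => p.2 > 1) with hl
  have hnd : (l.map Prod.fst).Nodup := by
    have hsub : (l.map Prod.fst).Sublist
        ((((PySem.Set.ofList ((pvR (cs.length : Int) n).map (pvGram cs n)))).map
           (fun g => (g, (((pvR (cs.length : Int) n).map (pvGram cs n)).count g : Int)))).map Prod.fst) :=
      List.Sublist.map Prod.fst (List.filter_sublist (p := fun p : List Char × Int => decide (p.2 > 1)))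
    rw [List.map_map] at hsub
    have : ((PySem.Set.ofList ((pvR (cs.length : Int) n).map (pvGram cs n))).map
        (Prod.fst ∘ fun g => (g, (((pvR (cs.length : Int) n).map (pvGram cs n)).count g : Int)))) =
        PySem.Set.ofList ((pvR (cs.length : Int) n).map (pvGram cs n)) := by
      rw [show (Prod.fst ∘ fun g : List Char => (g, (((pvR (cs.length : Int) n).map (pvGram cs n)).count g : Int))) = id from rfl, List.map_id]
    rw [this] at hsub
    exact hsub.nodup (PySem.Set.nodup_ofList _)
  have := PySem.Dict.items_foldl_insert_fresh (l := l) (k := Prod.fst) (v := Prod.snd)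
      (d := PySem.Dict.empty) (by intro a _; exact PySem.Dict.contains_empty _) hnd
  simpa using this

theorem pv_itemsA (cs : List Char) (n : Int) :
    ((get_repeated_ngrams_frequencies cs n).items.foldl
        (fun d p => d.insert p.1 (pvFindLoop cs p.1 p.2).2) PySem.Dict.empty).items
    = ((PySem.Set.ofList ((pvR (cs.length : Int) n).map (pvGram cs n))).filter
          (fun g => decide ((((pvR (cs.length : Int) n).map (pvGram cs n)).count g : Int) > 1))).map
        (fun g => (g, (pvFindLoop cs g (((pvR (cs.length : Int) n).map (pvGram cs n)).count g : Int)).2)) := by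
  rw [pv_freq_items]
  set l := ((PySem.Set.ofList ((pvR (cs.length : Int) n).map (pvGram cs n))).map
         (fun g => (g, (((pvR (cs.length : Int) n).map (pvGram cs n)).count g : Int)))).filter
        (fun p => p.2 > 1) with hl
  have hnd : (l.map Prod.fst).Nodup := by
    have hsub : (l.map Prod.fst).Sublist
        ((((PySem.Set.ofList ((pvR (cs.length : Int) n).map (pvGram cs n)))).map
           (fun g => (g, (((pvR (cs.length : Int) n).map (pvGram cs n)).count g : Int)))).map Prod.fst) :=
      List.Sublist.map Prod.fst (List.filter_sublist (p := fun p : List Char × Int => decide (p.2 > 1)))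
    rw [List.map_map] at hsub
    have : ((PySem.Set.ofList ((pvR (cs.length : Int) n).map (pvGram cs n))).map
        (Prod.fst ∘ fun g => (g, (((pvR (cs.length : Int) n).map (pvGram cs n)).count g : Int)))) =
        PySem.Set.ofList ((pvR (cs.length : Int) n).map (pvGram cs n)) := by
      rw [show (Prod.fst ∘ fun g : List Char => (g, (((pvR (cs.length : Int) n).map (pvGram cs n)).count g : Int))) = id from rfl, List.map_id]
    rw [this] at hsub
    exact hsub.nodup (PySem.Set.nodup_ofList _)
  have hfresh := PySem.Dict.items_foldl_insert_fresh (l := l) (k := Prod.fst)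
      (v := fun p => (pvFindLoop cs p.1 p.2).2)
      (d := PySem.Dict.empty) (by intro a _; exact PySem.Dict.contains_empty _) hnd
  rw [hfresh, hl, List.filter_map, List.map_map]
  simp [Function.comp_def, PySem.Dict.empty]

theorem pv_itemsB (cs : List Char) (n : Int) :
    (((PySem.List.pyRange 0 ((cs.length : Int) - n + 1) 1).foldl
        (fun d i => d.modify (PySem.List.slice cs (some i) (some (i + n))) [] (· ++ [i]))
        PySem.Dict.empty).items.filter (fun p => p.2.length > 1))
    = ((PySem.Set.ofList ((pvR (cs.length : Int) n).map (pvGram cs n))).filter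
          (fun g => decide ((pvOcc cs n g).length > 1))).map
        (fun g => (g, pvOcc cs n g)) := by
  have hD : ((PySem.List.pyRange 0 ((cs.length : Int) - n + 1) 1).foldl
        (fun d i => d.modify (PySem.List.slice cs (some i) (some (i + n))) [] (· ++ [i]))
        PySem.Dict.empty)
      = (((pvR (cs.length : Int) n).map (fun i => (pvGram cs n i, i))).foldl
        (fun d p => d.modify p.1 [] (· ++ [p.2])) PySem.Dict.empty) :=
    (List.foldl_map (f := fun i => (pvGram cs n i, i)) (g := fun (d : PySem.Dict (List Char) (List Int)) (p : (List Char) × Int) => d.modify p.1 [] (· ++ [p.2]))).symm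
  have hkeys : (((pvR (cs.length : Int) n).map (fun i => (pvGram cs n i, i))).foldl
        (fun d p => d.modify p.1 [] (· ++ [p.2])) (PySem.Dict.empty : PySem.Dict (List Char) (List Int))).keys
      = PySem.Set.ofList ((pvR (cs.length : Int) n).map (pvGram cs n)) := by
    rw [PySem.Dict.keys_foldl_modify_key]
    simp [PySem.Dict.empty, PySem.Set.update_nil_left, List.map_map, Function.comp_def]
  have hnd : (((pvR (cs.length : Int) n).map (fun i => (pvGram cs n i, i))).foldl
        (fun d p => d.modify p.1 [] (· ++ [p.2])) (PySem.Dict.empty : PySem.Dict (List Char) (List Int))).keys.Nodup := by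
    rw [hkeys]; exact PySem.Set.nodup_ofList _
  have hval : ∀ g : List Char, (((pvR (cs.length : Int) n).map (fun i => (pvGram cs n i, i))).foldl
        (fun d p => d.modify p.1 [] (· ++ [p.2])) (PySem.Dict.empty : PySem.Dict (List Char) (List Int))).getD g [] = pvOcc cs n g := by
    intro g
    rw [PySem.Dict.getD_foldl_modify_append, List.filter_map, List.map_map]
    simp [Function.comp_def, PySem.Dict.empty, pvOcc, PySem.Dict.getD, PySem.Dict.get?]
  have hitems : (((pvR (cs.length : Int) n).map (fun i => (pvGram cs n i, i))).foldl
        (fun d p => d.modify p.1 [] (· ++ [p.2])) (PySem.Dict.empty : PySem.Dict (List Char) (List Int))).items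
      = (PySem.Set.ofList ((pvR (cs.length : Int) n).map (pvGram cs n))).map
          (fun g => (g, pvOcc cs n g)) := by
    rw [PySem.Dict.items_eq_map_keys _ hnd [], hkeys]
    exact List.map_congr_left (fun g hg => by rw [hval])
  rw [hD, hitems, List.filter_map]
  simp [Function.comp_def]

theorem pv_gram_length (cs : List Char) (n : Int) (hn : 0 ≤ n) (i : Int)
    (hi : i ∈ pvR (cs.length : Int) n) : ((pvGram cs n i).length : Int) = n := by
  unfold pvR at hi
  rw [PySem.List.mem_pyRange_one] at hi
  unfold pvGram
  rw [PySem.List.slice_toNat (a := i) (b := i + n) cs (by omega) (by omega)]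
  simp only [List.length_take, List.length_drop]
  push_cast
  omega

theorem pv_count_eq (cs : List Char) (n : Int) (g : List Char) :
    ((pvR (cs.length : Int) n).map (pvGram cs n)).count g = (pvOcc cs n g).length := by
  rw [List.count_eq_countP, List.countP_map, List.countP_eq_length_filter]
  rfl

-- ===== VERDICT (by name: the statement is the Claim_ definition above) =====
theorem equals_ngrams_positions_spec : Claim_equal_equals_ngrams_positions := by
  intro ciphertext n _hDom hPre
  have hn : 0 ≤ n := hPre
  unfold Spec_equals_ngrams_positions
  unfold equals_ngrams_positions equals_ngrams_positions_alt
  simp only []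
  rw [pv_itemsA ciphertext.toList n, pv_itemsB ciphertext.toList n]
  congr 1
  have hcount := pv_count_eq ciphertext.toList n
  have hfilt : ((PySem.Set.ofList ((pvR (ciphertext.toList.length : Int) n).map (pvGram ciphertext.toList n))).filter
        (fun g => decide ((((pvR (ciphertext.toList.length : Int) n).map (pvGram ciphertext.toList n)).count g : Int) > 1)))
      = ((PySem.Set.ofList ((pvR (ciphertext.toList.length : Int) n).map (pvGram ciphertext.toList n))).filter
        (fun g => decide ((pvOcc ciphertext.toList n g).length > 1))) :=
    List.filter_congr (fun g _ => by rw [hcount g]; exact decide_eq_decide.mpr (by omega))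
  rw [hfilt]
  refine List.map_congr_left ?_
  intro g hg
  have hgG : g ∈ ((pvR (ciphertext.toList.length : Int) n).map (pvGram ciphertext.toList n)) :=
    (PySem.Set.mem_ofList _ _).mp (List.mem_filter.mp hg).1
  obtain ⟨i, hiR, hig⟩ := List.mem_map.mp hgG
  have hglen : (g.length : Int) = n := hig ▸ pv_gram_length ciphertext.toList n hn i hiR
  rw [hcount g, pv_findLoop_eq_occ ciphertext.toList g n hn hglen]
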